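-- pv_equiv track=rewrite | github.com/jordanperr/PyElemCA | diametergraphs.py | steps_until_repeat
-- ===== SOURCE A (Python) =====
-- def elem_step(state, rule):
-- 	nextState = []
-- 	n = len(state)
-- 	# Built nextState term by term
-- 	for i in range(n):
-- 		# compute neighbors
-- 		if i==0:
-- 			neighbors = [state[n-1], state[0], state[1]]
-- 		if i==n-1:
-- 			neighbors = [state[n-2], state[n-1], state[0]]
-- 		else:
-- 			neighbors = [state[i-1], state[i], state[i+1]]
-- 		# convert state of neighbors to an integer
-- 		num = neighbors[2]*2**0 + neighbors[1]*2**1 + neighbors[0]*2**2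
-- 		# Identify bit in RULE that corresponds to neighbor vector
-- 		thisBit = (rule >> num) % 2
-- 		# Append that bit to nextState
-- 		nextState.append(thisBit)
-- 	return tuple(nextState)
--
-- def steps_until_repeat(state, rule, red, cycles):
-- 	step = 0
-- 	blue = {}
--
-- 	# Step 1, Traverse until repeat
-- 	initial_state = state
-- 	while True:
--
-- 		if state in blue:
-- 			# We've encountered a new cycle. Finish cycle.
-- 			C = step - blue[state] #step+1?
-- 			cycleState = state
-- 			for i in range(C):
-- 				red[cycleState] = C
-- 				cycleState = elem_step(cycleState,rule)
-- 			cycles.append(C)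
-- 			break
--
-- 		if state in red:
-- 			blue[state] = step
-- 			C = red[state]
-- 			break
--
-- 		# We've encountered an unvisited vertex. Keep going.
-- 		blue[state] = step
-- 		state = elem_step(state, rule)
-- 		step += 1
--
-- 	# We've encountered a finished tail or cycle, or just finished a cycle.
-- 	# If there is a tail, we have to finish it.
-- 	# At this point, state = a finished state, but its blue number is distance from IV
-- 	if (blue[state] > 0):
-- 		tailState = initial_state
-- 		for n in range(blue[state])[::-1]:
-- 			red[tailState] = C + n + 1
-- 			tailState = elem_step(tailState,rule)
--
-- 	return red[initial_state]-1
-- ===== SOURCE B (Python) =====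
-- # B: single forward walk with a visited set and a closed-form return value.
-- # A fills `red`/`cycles` in place and reads the answer back out of `red`; the
-- # answer itself is just `step - 1` when the walk closes a new cycle and
-- # `red[state] + step - 1` when it reaches an already-finished state, so B
-- # returns that directly and performs no in-place updates of red/cycles
-- # (equivalence is about the return value only).
--
-- def elem_step(state, rule):
-- 	nextState = []
-- 	n = len(state)
-- 	# Built nextState term by term
-- 	for i in range(n):
-- 		# compute neighbors
-- 		if i==0:
-- 			neighbors = [state[n-1], state[0], state[1]]
-- 		if i==n-1:
-- 			neighbors = [state[n-2], state[n-1], state[0]]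
-- 		else:
-- 			neighbors = [state[i-1], state[i], state[i+1]]
-- 		# convert state of neighbors to an integer
-- 		num = neighbors[2]*2**0 + neighbors[1]*2**1 + neighbors[0]*2**2
-- 		# Identify bit in RULE that corresponds to neighbor vector
-- 		thisBit = (rule >> num) % 2
-- 		# Append that bit to nextState
-- 		nextState.append(thisBit)
-- 	return tuple(nextState)
--
-- def steps_until_repeat(state, rule, red, cycles):
-- 	seen = set()
-- 	step = 0
-- 	while True:
-- 		if state in red:
-- 			return red[state] + step - 1
-- 		if state in seen:
-- 			return step - 1
-- 		seen.add(state)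
-- 		state = elem_step(state, rule)
-- 		step += 1
-- ===== Notes on version B (the rewrite author's own statement) =====
-- stated objective: simpler
-- what changed: A fills the red dict over the cycle and tail with two extra elem_step re-walks and reads the answer back out of red[initial_state]; B does one forward walk with a visited set and returns the closed form directly (step-1 on closing a new cycle, red[state]+step-1 on reaching a finished state), dropping the blue step-number dict, both refill loops and the dict read-back; B does not mutate red/cycles (return value only).
import Mathlib
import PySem

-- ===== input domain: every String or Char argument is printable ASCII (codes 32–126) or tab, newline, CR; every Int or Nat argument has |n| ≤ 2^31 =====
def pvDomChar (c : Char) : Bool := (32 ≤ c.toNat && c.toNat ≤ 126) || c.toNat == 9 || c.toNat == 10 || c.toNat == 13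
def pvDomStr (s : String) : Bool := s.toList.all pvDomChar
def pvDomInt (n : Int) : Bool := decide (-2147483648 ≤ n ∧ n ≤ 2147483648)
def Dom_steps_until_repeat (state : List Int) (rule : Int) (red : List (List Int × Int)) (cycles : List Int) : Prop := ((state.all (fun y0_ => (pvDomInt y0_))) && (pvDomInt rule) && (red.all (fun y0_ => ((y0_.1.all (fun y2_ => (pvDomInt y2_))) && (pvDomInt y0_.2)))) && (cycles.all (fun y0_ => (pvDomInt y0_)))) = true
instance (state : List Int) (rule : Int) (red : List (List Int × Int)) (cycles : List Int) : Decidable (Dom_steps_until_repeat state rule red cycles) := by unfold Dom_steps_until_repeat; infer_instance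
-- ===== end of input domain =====

-- B replaces A's in-place filling of `red` over the cycle and the tail (two elem_step
-- re-walks) and the read-back `red[initial_state]-1` by a single forward walk with a
-- visited set that returns the closed-form answer directly; A (the Python) mutates its
-- `red`/`cycles` arguments, B does not — the equivalence proved here is about the
-- RETURN value only.

-- ===== PORT A =====
-- loop body of elem_step: the Python's `if i==0` assignment of `neighbors` is always
-- overwritten by the following if/else (for n ≥ 2; for n = 1 the Python raises
-- IndexError inside it, excluded by Pre_), so only the live if/else is ported.
def pvBit (state : List Int) (rule : Int) (i : Int) : Int :=
  let n : Int := (state.length : Int)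
  let neighbors : List Int :=
    if i == n - 1 then
      [PySem.List.pyGetD state (n - 2) 0, PySem.List.pyGetD state (n - 1) 0,
        PySem.List.pyGetD state 0 0]
    else
      [PySem.List.pyGetD state (i - 1) 0, PySem.List.pyGetD state i 0,
        PySem.List.pyGetD state (i + 1) 0]
  let num : Int := PySem.List.pyGetD neighbors 2 0 * 2 ^ (0 : Nat)
    + PySem.List.pyGetD neighbors 1 0 * 2 ^ (1 : Nat)
    + PySem.List.pyGetD neighbors 0 0 * 2 ^ (2 : Nat)
  -- Python `rule >> num` raises ValueError for num < 0 (excluded by Pre_); 0 is junk there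
  if num < 0 then 0 else PySem.Int.mod (rule >>> num.toNat) 2

def elemStep (state : List Int) (rule : Int) : List Int :=
  (PySem.List.pyRange 0 (state.length : Int) 1).foldl
    (fun nextState i => nextState ++ [pvBit state rule i]) []

-- `while True` rendered with fuel 2^n+2 (an upper bound on the number of loop
-- iterations, proved in the lemmas below); the fuel-0 branch is unreachable.
def pvAloop (rule : Int) (fuel : Nat) (state : List Int) (red : PySem.Dict (List Int) Int)
    (cycles : List Int) (blue : PySem.Dict (List Int) Int) (step : Int) :
    List Int × PySem.Dict (List Int) Int × List Int × PySem.Dict (List Int) Int × Int :=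
  match fuel with
  | 0 => (state, red, cycles, blue, 0)
  | fuel + 1 =>
    if blue.contains state then
      let C := step - blue.getD state 0
      let fin := (PySem.List.pyRange 0 C 1).foldl
        (fun (p : PySem.Dict (List Int) Int × List Int) _i =>
          (p.1.insert p.2 C, elemStep p.2 rule)) (red, state)
      (state, fin.1, cycles ++ [C], blue, C)
    else if red.contains state then
      (state, red, cycles, blue.insert state step, red.getD state 0)
    else
      pvAloop rule fuel (elemStep state rule) red cycles (blue.insert state step) (step + 1)

-- code after the `while` loop: tail fill plus the read-back `red[initial_state]-1`
def pvApost (rule : Int) (initial : List Int)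
    (r : List Int × PySem.Dict (List Int) Int × List Int × PySem.Dict (List Int) Int × Int) :
    Int :=
  let state := r.1
  let red := r.2.1
  let blue := r.2.2.2.1
  let C := r.2.2.2.2
  let red2 :=
    if blue.getD state 0 > 0 then
      ((PySem.List.pyRange 0 (blue.getD state 0) 1).reverse.foldl
        (fun (p : PySem.Dict (List Int) Int × List Int) n =>
          (p.1.insert p.2 (C + n + 1), elemStep p.2 rule)) (red, initial)).1
    else red
  red2.getD initial 0 - 1

def steps_until_repeat (state : List Int) (rule : Int) (red : List (List Int × Int))
    (cycles : List Int) : Int :=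
  pvApost rule state
    (pvAloop rule (2 ^ state.length + 2) state (PySem.Dict.ofList red) cycles
      PySem.Dict.empty 0)

-- ===== PORT B =====
-- B's Python reuses the module helper elem_step verbatim, hence the shared elemStep.
def pvBloop (rule : Int) (fuel : Nat) (state : List Int) (red : PySem.Dict (List Int) Int)
    (seen : PySem.Set (List Int)) (step : Int) : Int :=
  match fuel with
  | 0 => 0
  | fuel + 1 =>
    if red.contains state then
      red.getD state 0 + step - 1
    else if PySem.Set.contains seen state then
      step - 1
    else
      pvBloop rule fuel (elemStep state rule) red (PySem.Set.add seen state) (step + 1)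

def steps_until_repeat_alt (state : List Int) (rule : Int) (red : List (List Int × Int))
    (cycles : List Int) : Int :=
  pvBloop rule (2 ^ state.length + 2) state (PySem.Dict.ofList red) PySem.Set.empty 0

-- ===== PRECONDITION & SPEC =====
-- Pre_ holds exactly where the Python A returns normally: either the initial state is
-- already a key of red (A answers before ever calling elem_step), or the state has
-- length ≠ 1 (length 1 raises IndexError in elem_step) and every cyclic neighbor
-- triple encodes a nonnegative number (a negative one raises ValueError in rule >> num).
def Pre_steps_until_repeat (state : List Int) (rule : Int) (red : List (List Int × Int))
    (cycles : List Int) : Prop :=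
  (PySem.Dict.ofList red).contains state = true ∨
  (state.length ≠ 1 ∧ ∀ i ∈ List.range state.length,
    0 ≤ 4 * state.getD ((i + state.length - 1) % state.length) 0
      + 2 * state.getD i 0 + state.getD ((i + 1) % state.length) 0)

instance (state : List Int) (rule : Int) (red : List (List Int × Int)) (cycles : List Int) :
    Decidable (Pre_steps_until_repeat state rule red cycles) := by
  unfold Pre_steps_until_repeat; infer_instance

def pvWitness_steps_until_repeat : List Int × Int × (List (List Int × Int)) × List Int :=
  ([0, 1], 30, [([1, 1], 4)], [])

def Spec_steps_until_repeat (state : List Int) (rule : Int) (red : List (List Int × Int))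
    (cycles : List Int) (out : Int) : Prop :=
  out = steps_until_repeat_alt state rule red cycles

instance (state : List Int) (rule : Int) (red : List (List Int × Int)) (cycles : List Int)
    (out : Int) : Decidable (Spec_steps_until_repeat state rule red cycles out) := by
  unfold Spec_steps_until_repeat; infer_instance

-- ===== CLAIM (what is proved, stated in full; the proofs are below) =====
def Claim_equal_steps_until_repeat : Prop := ∀ (state : List Int) (rule : Int) (red : List (List Int × Int)) (cycles : List Int), Dom_steps_until_repeat state rule red cycles → Pre_steps_until_repeat state rule red cycles → Spec_steps_until_repeat state rule red cycles (steps_until_repeat state rule red cycles)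

-- ===== LEMMAS AND PROOFS =====

lemma pv_elemStep_eq_map (state : List Int) (rule : Int) :
    elemStep state rule
      = (PySem.List.pyRange 0 (state.length : Int) 1).map (pvBit state rule) := by
  unfold elemStep
  simpa using PySem.List.foldl_append_singleton_eq_map (f := pvBit state rule)
    (l := PySem.List.pyRange 0 (state.length : Int) 1) (acc := [])

lemma pv_elemStep_length (state : List Int) (rule : Int) :
    (elemStep state rule).length = state.length := by
  simp [pv_elemStep_eq_map, PySem.List.length_pyRange_one]

lemma pv_bit01 (rule v : Int) :
    (if v < 0 then (0:Int) else PySem.Int.mod (rule >>> v.toNat) 2) = 0 ∨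
    (if v < 0 then (0:Int) else PySem.Int.mod (rule >>> v.toNat) 2) = 1 := by
  split
  · left; rfl
  · have h1 := PySem.Int.mod_nonneg (rule >>> v.toNat) (by norm_num : (0:Int) < 2)
    have h2 := PySem.Int.mod_lt (rule >>> v.toNat) (by norm_num : (0:Int) < 2)
    omega

lemma pv_elemStep_bin (state : List Int) (rule : Int) :
    ∀ x ∈ elemStep state rule, x = 0 ∨ x = 1 := by
  intro x hx
  rw [pv_elemStep_eq_map] at hx
  rcases List.mem_map.mp hx with ⟨i, _, rfl⟩
  exact pv_bit01 rule _

def pvEncode (s : List Int) : Nat := s.foldr (fun x a => x.toNat + 2 * a) 0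

lemma pv_encode_lt (s : List Int) (h : ∀ x ∈ s, x = 0 ∨ x = 1) :
    pvEncode s < 2 ^ s.length := by
  induction s with
  | nil => simp [pvEncode]
  | cons x t ih =>
    have hx : x = 0 ∨ x = 1 := h x List.mem_cons_self
    have ht := ih (fun y hy => h y (List.mem_cons_of_mem _ hy))
    have hxn : x.toNat ≤ 1 := by rcases hx with rfl | rfl <;> simp
    simp only [pvEncode, List.foldr_cons, List.length_cons] at *
    have : (2:Nat) ^ (t.length + 1) = 2 * 2 ^ t.length := by ring
    omega

lemma pv_encode_inj : ∀ (s t : List Int), s.length = t.length →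
    (∀ x ∈ s, x = 0 ∨ x = 1) → (∀ x ∈ t, x = 0 ∨ x = 1) →
    pvEncode s = pvEncode t → s = t := by
  intro s
  induction s with
  | nil => intro t hlen _ _ _; cases t with
    | nil => rfl
    | cons y t => simp at hlen
  | cons x s ih =>
    intro t hlen hs ht he
    cases t with
    | nil => simp at hlen
    | cons y t =>
      have hx : x = 0 ∨ x = 1 := hs x List.mem_cons_self
      have hy : y = 0 ∨ y = 1 := ht y List.mem_cons_self
      simp only [pvEncode, List.foldr_cons] at he
      have hxy : x = y ∧ (pvEncode s = pvEncode t) := by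
        have hx1 : x.toNat ≤ 1 := by rcases hx with rfl | rfl <;> simp
        have hy1 : y.toNat ≤ 1 := by rcases hy with rfl | rfl <;> simp
        have hxn : x.toNat = y.toNat ∧ pvEncode s = pvEncode t := by
          simp only [pvEncode]; omega
        refine ⟨?_, hxn.2⟩
        rcases hx with rfl | rfl <;> rcases hy with rfl | rfl <;> simp_all
      rw [hxy.1, ih t (by simpa using hlen) (fun z hz => hs z (List.mem_cons_of_mem _ hz))
        (fun z hz => ht z (List.mem_cons_of_mem _ hz)) hxy.2]

lemma pv_count (n : Nat) (l : List (List Int)) (hnd : l.Nodup)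
    (hlen : ∀ s ∈ l, s.length = n) (hbin : ∀ s ∈ l, ∀ x ∈ s, x = 0 ∨ x = 1) :
    l.length ≤ 2 ^ n := by
  have hmapnd : (l.map pvEncode).Nodup := by
    refine List.Nodup.map_on ?_ hnd
    intro s hsl t htl he
    exact pv_encode_inj s t (by rw [hlen s hsl, hlen t htl]) (hbin s hsl) (hbin t htl) he
  have hsub : (l.map pvEncode).toFinset ⊆ Finset.range (2 ^ n) := by
    intro v hv
    simp only [List.mem_toFinset, List.mem_map] at hv
    rcases hv with ⟨s, hsl, rfl⟩
    exact Finset.mem_range.mpr (by simpa [hlen s hsl] using pv_encode_lt s (hbin s hsl))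
  have := Finset.card_le_card hsub
  simpa [List.toFinset_card_of_nodup hmapnd, Finset.card_range] using this

lemma pv_iter_chain (f : List Int → List Int) (l : List (List Int))
    (h : List.IsChain (fun a b => b = f a) l) (j : Nat) :
    ∀ (k : Nat) (hjk : j + k < l.length),
      f^[k] (l[j]'(by omega)) = l[j + k]'hjk := by
  intro k
  induction k with
  | zero => intro hjk; simp
  | succ k ih =>
    intro hjk
    have hk' : j + k < l.length := by omega
    rw [Function.iterate_succ_apply', ih hk']
    have := List.IsChain.getElem h (j + k) (by omega)
    simpa [Nat.add_assoc] using this.symm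

lemma pv_fill_skip (val : Int → Int) (stepf : List Int → List Int) :
    ∀ (L : List Int) (d : PySem.Dict (List Int) Int) (s x : List Int),
      (∀ k, k < L.length → stepf^[k] s ≠ x) →
      ((L.foldl (fun (p : PySem.Dict (List Int) Int × List Int) n =>
          (p.1.insert p.2 (val n), stepf p.2)) (d, s)).1).getD x 0 = d.getD x 0 := by
  intro L
  induction L with
  | nil => intro d s x _; simp
  | cons a L ih =>
    intro d s x h
    have h0 : s ≠ x := by simpa using h 0 (by simp)
    simp only [List.foldl_cons]
    rw [ih (d.insert s (val a)) (stepf s) x ?_]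
    · exact PySem.Dict.getD_insert_of_ne d (val a) 0 (fun he => h0 he.symm)
    · intro k hk
      have := h (k + 1) (by simpa using Nat.succ_lt_succ hk)
      simpa [Function.iterate_succ_apply] using this

lemma pv_fill_first (val : Int → Int) (stepf : List Int → List Int)
    (a : Int) (L' : List Int) (d : PySem.Dict (List Int) Int) (s : List Int)
    (h : ∀ k, 0 < k → k < L'.length + 1 → stepf^[k] s ≠ s) :
    (((a :: L').foldl (fun (p : PySem.Dict (List Int) Int × List Int) n =>
        (p.1.insert p.2 (val n), stepf p.2)) (d, s)).1).getD s 0 = val a := by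
  simp only [List.foldl_cons]
  rw [pv_fill_skip val stepf L' (d.insert s (val a)) (stepf s) s ?_]
  · exact PySem.Dict.getD_insert_self d s (val a) 0
  · intro k hk
    have := h (k + 1) (by omega) (by omega)
    simpa [Function.iterate_succ_apply] using this

lemma pv_headD_append (path : List (List Int)) (state y : List Int) :
    (path ++ [state]).headD y = path.headD state := by
  cases path <;> simp

lemma pv_chain_snoc (R : List Int → List Int → Prop) (l : List (List Int)) (y : List Int)
    (h : List.IsChain R l) (hl : l ≠ []) (hlast : R (l.getLast hl) y) :
    List.IsChain R (l ++ [y]) := by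
  rw [List.isChain_append]
  refine ⟨h, List.IsChain.singleton y, ?_⟩
  intro x hx y' hy'
  simp at hy'; subst hy'
  rw [List.getLast?_eq_some_getLast hl] at hx
  simp at hx
  exact hx ▸ hlast

lemma pv_loop_eq (rule : Int) (red : PySem.Dict (List Int) Int) :
    ∀ (fuel : Nat) (path : List (List Int)) (state : List Int)
      (blue : PySem.Dict (List Int) Int) (cycles : List Int),
      (∀ s, blue.contains s = decide (s ∈ path)) →
      (∀ (k : Nat) (hk : k < path.length), blue.getD (path[k]'hk) 0 = (k : Int)) →
      path.Nodup →
      (∀ s ∈ path, red.contains s = false) →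
      List.IsChain (fun a b => b = elemStep a rule) (path ++ [state]) →
      (∀ s ∈ (path ++ [state]).tail, ∀ x ∈ s, x = 0 ∨ x = 1) →
      (∀ s ∈ path ++ [state], s.length = (path.headD state).length) →
      fuel + path.length = 2 ^ (path.headD state).length + 2 →
      pvApost rule (path.headD state)
          (pvAloop rule fuel state red cycles blue (path.length : Int))
        = pvBloop rule fuel state red path (path.length : Int) := by
  intro fuel
  induction fuel with
  | zero =>
    intro path state blue cycles Hc Hg Hnd Hred Hch Hbin Hlen Hfuel
    exfalso
    cases path with
    | nil =>
      simp only [List.length_nil, Nat.add_zero, List.headD_nil] at Hfuel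
      have := Nat.one_le_two_pow (n := state.length)
      omega
    | cons p0 rest =>
      have hbin' : ∀ s ∈ rest, ∀ x ∈ s, x = 0 ∨ x = 1 := by
        intro s hs; exact Hbin s (by simp [hs])
      have hlen' : ∀ s ∈ rest, s.length = p0.length := by
        intro s hs
        have := Hlen s (by simp [hs])
        simpa using this
      have hcount := pv_count p0.length rest (List.nodup_cons.mp Hnd).2 hlen' hbin'
      simp only [List.length_cons, List.headD_cons] at Hfuel
      omega
  | succ fuel ih =>
    intro path state blue cycles Hc Hg Hnd Hred Hch Hbin Hlen Hfuel
    have hiterP : ∀ (i k : Nat) (h : i + k < path.length),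
        (fun t => elemStep t rule)^[k] (path[i]'(by omega)) = path[i + k]'h := by
      intro i k h
      have h1 := pv_iter_chain (fun t => elemStep t rule) (path ++ [state]) Hch i k
        (by simp; omega)
      rwa [List.getElem_append_left (by omega), List.getElem_append_left h] at h1
    have hne : ∀ (i k : Nat) (hi : i < path.length) (hk : k < path.length), i ≠ k →
        path[i]'hi ≠ path[k]'hk := by
      intro i k hi hk hik he
      exact hik ((List.Nodup.getElem_inj_iff Hnd).mp he)
    by_cases hb : blue.contains state = true
    · -- revisit of a path state: a new cycle is closed
      have hmem : state ∈ path := by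
        have := Hc state; rw [hb] at this; exact of_decide_eq_true this.symm
      obtain ⟨j, hj, hji⟩ := List.mem_iff_getElem.mp hmem
      have hlenpos : 0 < path.length := by omega
      have hredst : red.contains state = false := Hred state hmem
      have hseen : PySem.Set.contains path state = true :=
        (PySem.Set.contains_iff path state).mpr hmem
      have hgj : blue.getD state 0 = (j : Int) := by rw [← hji]; exact Hg j hj
      have hinit : path.headD state = path[0]'hlenpos := by
        cases path with | nil => simp at hlenpos | cons a t => simp
      simp only [pvBloop, if_neg (by simp [hredst] : ¬ red.contains state = true),
        if_pos hseen]
      simp only [pvAloop, if_pos hb, pvApost, hgj, hinit]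
      by_cases hj0 : j = 0
      · -- no tail: the initial state itself is on the cycle
        subst hj0
        rw [if_neg (by simp)]
        have h0j : path[0]'hlenpos = state := hji
        rw [← h0j]
        have hC : (0:Int) < (path.length : Int) - ((0:Nat) : Int) := by
          push_cast; omega
        rw [PySem.List.pyRange_one_cons hC]
        rw [pv_fill_first (fun _ => (path.length : Int) - ((0:Nat) : Int))
          (fun t => elemStep t rule) 0
          (PySem.List.pyRange (0 + 1) ((path.length : Int) - ((0:Nat) : Int)) 1) red
          (path[0]'hlenpos) ?_]
        · push_cast; ring
        · intro k hk0 hkb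
          rw [PySem.List.length_pyRange_one] at hkb
          rw [hiterP 0 k (by omega)]
          exact hne (0 + k) 0 (by omega) hlenpos (by omega)
      · -- a tail precedes the cycle
        have hjpos : (0:Int) < (j:Int) := by omega
        rw [if_pos hjpos]
        have hrev : (PySem.List.pyRange 0 ((j:Int)) 1).reverse
            = ((j:Int) - 1) :: (PySem.List.pyRange 0 ((j:Int) - 1) 1).reverse := by
          have h2 := PySem.List.pyRange_one_succ_right (a := 0) (b := (j:Int) - 1)
            (by omega)
          rw [show (j:Int) - 1 + 1 = (j:Int) by ring] at h2
          rw [h2]; simp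
        rw [hrev]
        rw [pv_fill_first (fun n => ((path.length : Int) - (j:Int)) + n + 1)
          (fun t => elemStep t rule) ((j:Int) - 1)
          (PySem.List.pyRange 0 ((j:Int) - 1) 1).reverse _ (path[0]'hlenpos) ?_]
        · ring
        · intro k hk0 hkb
          rw [List.length_reverse, PySem.List.length_pyRange_one] at hkb
          have hkj : k < j := by omega
          rw [hiterP 0 k (by omega)]
          exact hne (0 + k) 0 (by omega) hlenpos (by omega)
    · -- state not yet visited
      have hnmem : state ∉ path := by
        have := Hc state
        rw [Bool.not_eq_true] at hb
        rw [hb] at this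
        exact of_decide_eq_false this.symm
      by_cases hr : red.contains state = true
      · -- finished state reached: answer read from red
        simp only [pvBloop, if_pos hr]
        simp only [pvAloop, if_neg hb, if_pos hr, pvApost]
        rw [PySem.Dict.getD_insert_self]
        by_cases hp : 0 < path.length
        · have hinit : path.headD state = path[0]'hp := by
            cases path with | nil => simp at hp | cons a t => simp
          rw [if_pos (by omega), hinit]
          have hrev : (PySem.List.pyRange 0 ((path.length : Int)) 1).reverse
              = ((path.length : Int) - 1)
                :: (PySem.List.pyRange 0 ((path.length : Int) - 1) 1).reverse := by
            have h2 := PySem.List.pyRange_one_succ_right (a := 0)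
              (b := (path.length : Int) - 1) (by omega)
            rw [show (path.length : Int) - 1 + 1 = (path.length : Int) by ring] at h2
            rw [h2]; simp
          rw [hrev]
          rw [pv_fill_first (fun n => red.getD state 0 + n + 1)
            (fun t => elemStep t rule) ((path.length : Int) - 1)
            (PySem.List.pyRange 0 ((path.length : Int) - 1) 1).reverse red
            (path[0]'hp) ?_]
          · ring
          · intro k hk0 hkb
            rw [List.length_reverse, PySem.List.length_pyRange_one] at hkb
            have hkl : k < path.length := by omega
            rw [hiterP 0 k (by omega)]
            exact hne (0 + k) 0 (by omega) hp (by omega)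
        · have hp0 : path = [] := List.eq_nil_iff_length_eq_zero.mpr (by omega)
          subst hp0
          rw [if_neg (by simp)]
          simp
      · -- unvisited: loop continues
        have hseenf : ¬ PySem.Set.contains path state = true := by
          rw [PySem.Set.contains_iff]; exact hnmem
        simp only [pvBloop, if_neg hseenf, if_neg hr, pvAloop, if_neg hb]
        rw [PySem.Set.add_of_not_mem hnmem]
        have hstep : (path.length : Int) + 1 = (((path ++ [state]).length : Nat) : Int) := by
          simp
        have hhead : (path ++ [state]).headD (elemStep state rule) = path.headD state :=
          pv_headD_append path state _
        have happly := ih (path ++ [state]) (elemStep state rule)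
          (blue.insert state (path.length : Int)) cycles ?_ ?_ ?_ ?_ ?_ ?_ ?_ ?_
        · rw [hstep]
          rw [pv_headD_append] at happly
          exact happly
        · intro s
          rw [PySem.Dict.contains_insert, Hc s]
          simp only [List.mem_append, List.mem_singleton]
          by_cases hs : s = state <;> by_cases hsp : s ∈ path <;> simp [hs, hsp]
        · intro k hk
          simp only [List.length_append, List.length_singleton] at hk
          by_cases hkl : k < path.length
          · rw [List.getElem_append_left hkl]
            rw [PySem.Dict.getD_insert_of_ne _ _ _
              (fun he => hnmem (by rw [← he]; exact List.getElem_mem hkl))]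
            exact Hg k hkl
          · have hkeq : k = path.length := by omega
            subst hkeq
            rw [List.getElem_concat_length rfl (by simp)]
            exact PySem.Dict.getD_insert_self blue state (path.length : Int) 0
        · simp [List.nodup_append, Hnd]
          intro a ha he
          exact hnmem (he ▸ ha)
        · intro s hs
          rcases List.mem_append.mp hs with hs | hs
          · exact Hred s hs
          · rw [List.mem_singleton.mp hs]
            rwa [Bool.not_eq_true] at hr
        · refine pv_chain_snoc _ _ _ Hch (by simp) ?_
          rw [List.getLast_concat]
        · intro s hs
          have hs' : s ∈ (path ++ [state]).tail ++ [elemStep state rule] := by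
            cases path with
            | nil => simpa using hs
            | cons p0 t => simpa using hs
          rcases List.mem_append.mp hs' with h1 | h1
          · exact Hbin s h1
          · rw [List.mem_singleton.mp h1]
            exact pv_elemStep_bin state rule
        · intro s hs
          rw [pv_headD_append]
          rcases List.mem_append.mp hs with h1 | h1
          · exact Hlen s h1
          · rw [List.mem_singleton.mp h1, pv_elemStep_length]
            exact Hlen state (by simp)
        · rw [pv_headD_append]
          simp only [List.length_append, List.length_singleton]
          omega

-- ===== VERDICT (by name: the statement is the Claim_ definition above) =====
theorem steps_until_repeat_spec : Claim_equal_steps_until_repeat := by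
  intro state rule red cycles _hdom _hpre
  unfold Spec_steps_until_repeat steps_until_repeat steps_until_repeat_alt
  have h := pv_loop_eq rule (PySem.Dict.ofList red) (2 ^ state.length + 2) [] state
    PySem.Dict.empty cycles
    (by intro s; simp [PySem.Dict.contains_empty])
    (by intro k hk; simp at hk)
    List.nodup_nil
    (by intro s hs; simp at hs)
    (by simpa using List.IsChain.singleton state)
    (by intro s hs; simp at hs)
    (by intro s hs; simp at hs; simp [hs])
    (by simp)
  simpa using h
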